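-- pv_equiv track=rewrite | github.com/Stephanie-Espinoza/Markdown-Compiler | markdown_compiler.py | compile_italic_underscore
-- ===== SOURCE A (Python) =====
-- def compile_italic_underscore(line):
--     '''
--     Convert "_italic_" into "<i>italic</i>".
--
--     >>> compile_italic_underscore('_This is italic!_ This is not italic.')
--     '<i>This is italic!</i> This is not italic.'
--     >>> compile_italic_underscore('_This is italic!_')
--     '<i>This is italic!</i>'
--     >>> compile_italic_underscore('This is _italic_!')
--     'This is <i>italic</i>!'
--     >>> compile_italic_underscore('This is not _italic!')
--     'This is not _italic!'
--     >>> compile_italic_underscore('_')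
--     '_'
--     '''
--
--
--     accumulator = ''
--     inside_italic_tag = False
--     i_count = 1
--     i_total_count = 0
--
--     for c in line:
--         if c == '_':
--             i_total_count = i_total_count + 1
--
--     for c in line:
--         if c == '_':
--             inside_italic_tag = True
--         if c == '_':
--             inside_italic_tag = False
--         if c != '_' and inside_italic_tag==False:
--             accumulator += c
--         if c == '_' and inside_italic_tag == False:
--             if i_total_count%2==0:
--                 i_count = i_count + 1
--                 if i_count%2==0:
--                     nc = c.replace('_',"<i>")
--                     accumulator += nc
--                 if i_count%2==1:
--                     nc2 = c.replace('_',"</i>")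
--                     accumulator += nc2
--             else:
--                 return line
--     return accumulator
-- ===== SOURCE B (Python) =====
-- def compile_italic_underscore(line):
--     parts = line.split('_')
--     if len(parts) % 2 == 0:
--         return line
--     out = []
--     for i, p in enumerate(parts):
--         out.append('<i>' + p + '</i>' if i % 2 == 1 else p)
--     return ''.join(out)
-- ===== Notes on version B (the rewrite author's own statement) =====
-- stated objective: simpler
-- what changed: Replaces A's character-by-character accumulator state machine (with its dead inside_italic_tag flag and alternating i_count parity) by splitting on the underscore separator, wrapping every odd-indexed part in italic tags and joining, keeping the odd-count guard.
import Mathlib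
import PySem

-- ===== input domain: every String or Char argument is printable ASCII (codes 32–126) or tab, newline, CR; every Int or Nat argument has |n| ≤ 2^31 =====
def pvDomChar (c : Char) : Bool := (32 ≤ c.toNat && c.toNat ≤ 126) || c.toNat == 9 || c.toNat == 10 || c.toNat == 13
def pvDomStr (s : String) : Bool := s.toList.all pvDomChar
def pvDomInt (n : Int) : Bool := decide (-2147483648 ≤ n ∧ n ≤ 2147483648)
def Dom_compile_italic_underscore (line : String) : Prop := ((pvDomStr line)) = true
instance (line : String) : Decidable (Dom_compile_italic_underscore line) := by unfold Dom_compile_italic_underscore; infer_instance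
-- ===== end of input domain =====

-- B replaces A's char-by-char alternating-state accumulator with split('_') + wrap every odd-indexed part (same odd-count guard); objective: simpler.

-- ===== PORT A =====
-- the char loop of A; `none` models the early `return line`
def pvALoop (tot : Int) : List Char → List Char → Bool → Int → Option (List Char)
  | [], acc, _inside, _icount => some acc
  | c :: cs, acc, inside, icount =>
    let inside := if c == '_' then true else inside
    let inside := if c == '_' then false else inside
    let acc := if c ≠ '_' ∧ inside = false then acc ++ [c] else acc
    if c == '_' ∧ inside = false then
      if PySem.Int.mod tot 2 = 0 then
        let icount := icount + 1
        let acc := if PySem.Int.mod icount 2 = 0 then acc ++ ('<' :: 'i' :: '>' :: []) else acc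
        let acc := if PySem.Int.mod icount 2 = 1 then acc ++ ('<' :: '/' :: 'i' :: '>' :: []) else acc
        pvALoop tot cs acc inside icount
      else none
    else pvALoop tot cs acc inside icount

def compile_italic_underscore (line : String) : String :=
  let tot := line.toList.foldl (fun n c => if c == '_' then n + 1 else n) (0 : Int)
  match pvALoop tot line.toList [] false 1 with
  | some acc => String.mk acc
  | none => line

-- ===== PORT B =====
def compile_italic_underscore_alt (line : String) : String :=
  let parts := PySem.Chars.splitOn line.toList ['_']
  if parts.length % 2 = 0 then line
  else
    let out := (PySem.List.enumerate parts).map (fun pi =>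
      if PySem.Int.mod pi.1 2 = 1
      then ('<' :: 'i' :: '>' :: []) ++ pi.2 ++ ('<' :: '/' :: 'i' :: '>' :: [])
      else pi.2)
    String.mk (PySem.Chars.join [] out)

-- ===== PRECONDITION & SPEC =====
def Spec_compile_italic_underscore (line : String) (out : String) : Prop := out = compile_italic_underscore_alt line
instance (line : String) (out : String) : Decidable (Spec_compile_italic_underscore line out) := by unfold Spec_compile_italic_underscore; infer_instance

-- ===== CLAIM (what is proved, stated in full; the proofs are below) =====
def Claim_equal_compile_italic_underscore : Prop := ∀ (line : String), Dom_compile_italic_underscore line → Spec_compile_italic_underscore line (compile_italic_underscore line)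

-- ===== LEMMAS AND PROOFS =====

-- simple structural form of split on a single '_' separator
def pvSplitU : List Char → List Char → List (List Char)
  | [], cur => [cur.reverse]
  | c :: cs, cur => if c = '_' then cur.reverse :: pvSplitU cs [] else pvSplitU cs (c :: cur)

-- alternating rendering: parts joined with alternating <i> / </i> separators
def pvRender : List (List Char) → Bool → List Char
  | [], _ => []
  | [p], _ => p
  | p :: q :: rest, b =>
      p ++ (if b then ('<' :: 'i' :: '>' :: []) else ('<' :: '/' :: 'i' :: '>' :: [])) ++
        pvRender (q :: rest) (!b)

-- wrap-based rendering (B's shape): wrap every part whose flag is set, flags alternating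
def pvWrap : List (List Char) → Bool → List Char
  | [], _ => []
  | p :: ps, b =>
      (if b then ('<' :: 'i' :: '>' :: []) ++ p ++ ('<' :: '/' :: 'i' :: '>' :: []) else p) ++
        pvWrap ps (!b)

lemma pvSplitU_ne_nil (cs cur : List Char) : pvSplitU cs cur ≠ [] := by
  induction cs generalizing cur with
  | nil => simp [pvSplitU]
  | cons c cs ih =>
    by_cases h : c = '_' <;> simp [pvSplitU, h] <;> exact ih _

lemma pvSplitU_length (cs cur : List Char) :
    (pvSplitU cs cur).length = cs.countP (· == '_') + 1 := by
  induction cs generalizing cur with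
  | nil => simp [pvSplitU]
  | cons c cs ih =>
    by_cases h : c = '_'
    · simp [pvSplitU, List.countP_cons, h, ih]
    · simp [pvSplitU, List.countP_cons, h, ih]

lemma pvSplitOn_go_eq (fuel : Nat) (l cur : List Char) (acc : List (List Char))
    (h : l.length < fuel) :
    PySem.Chars.splitOn.go ['_'] fuel l cur acc = acc.reverse ++ pvSplitU l cur := by
  induction fuel generalizing l cur acc with
  | zero => omega
  | succ fuel ih =>
    cases l with
    | nil => simp [PySem.Chars.splitOn.go, pvSplitU]
    | cons c rest =>
      by_cases hc : c = '_'
      · subst hc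
        simp only [PySem.Chars.splitOn.go, List.isPrefixOf, pvSplitU]
        simp only [show ('_' == '_') = true from rfl, List.isPrefixOf_nil_left, Bool.and_true,
          if_pos rfl]
        rw [ih _ _ _ (by simpa using Nat.lt_of_succ_lt_succ h)]
        simp [pvSplitU]
      · have hpre : List.isPrefixOf ['_'] (c :: rest) = false := by
          simp [List.isPrefixOf]; exact fun h' => hc h'.symm
        simp only [PySem.Chars.splitOn.go, hpre, Bool.false_eq_true, if_neg, pvSplitU,
          if_neg hc]
        exact ih _ _ _ (by simpa using Nat.lt_of_succ_lt_succ h)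

lemma pvSplitOn_eq (cs : List Char) :
    PySem.Chars.splitOn cs ['_'] = pvSplitU cs [] := by
  unfold PySem.Chars.splitOn
  rw [pvSplitOn_go_eq _ _ _ _ (by omega)]
  simp

lemma pvRender_split (cs cur : List Char) (b : Bool) :
    pvRender (pvSplitU cs cur) b = cur.reverse ++ pvRender (pvSplitU cs []) b := by
  induction cs generalizing cur b with
  | nil => simp [pvSplitU, pvRender]
  | cons c cs ih =>
    by_cases h : c = '_'
    · obtain ⟨p, ps, hps⟩ := List.exists_cons_of_ne_nil (pvSplitU_ne_nil cs [])
      simp [pvSplitU, h, hps, pvRender]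
    · simp only [pvSplitU, if_neg h]
      rw [ih (c :: cur), ih [c]]
      simp

-- A's loop computes the alternating rendering of the split, when the total count is even
lemma pvALoop_even (tot : Int) (htot : PySem.Int.mod tot 2 = 0) (cs : List Char) :
    ∀ (acc : List Char) (icount : Int), 0 ≤ icount →
    pvALoop tot cs acc false icount =
      some (acc ++ pvRender (pvSplitU cs []) (PySem.Int.mod icount 2 == 1)) := by
  induction cs with
  | nil => intro acc icount _; simp [pvALoop, pvSplitU, pvRender]
  | cons c cs ih =>
    intro acc icount hic
    by_cases h : c = '_'
    · subst h
      have hm : ∀ a : Int, PySem.Int.mod a 2 = a % 2 :=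
        fun a => PySem.Int.mod_eq_emod_of_pos (by norm_num)
      obtain ⟨p, ps, hps⟩ := List.exists_cons_of_ne_nil (pvSplitU_ne_nil cs [])
      simp only [pvALoop, show ('_' == '_') = true from rfl, if_true, ne_eq, not_true_eq_false,
        false_and, if_false, and_true, htot]
      rw [ih _ (icount + 1) (by omega)]
      simp only [pvSplitU, if_pos rfl, hps, pvRender]
      rw [hm icount, hm (icount + 1)]
      rcases Int.emod_two_eq_zero_or_one icount with h2 | h2
      · have h3 : (icount + 1) % 2 = 1 := by omega
        simp [pvRender, h2, h3]
      · have h3 : (icount + 1) % 2 = 0 := by omega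
        simp [pvRender, h2, h3]
    · have hb : (c == '_') = false := by simp [h]
      simp only [pvALoop, hb, if_false, ne_eq, h, not_false_iff, true_and, if_true,
        Bool.false_eq_true, false_and]
      rw [ih _ icount hic,
        show pvSplitU (c :: cs) [] = pvSplitU cs [c] from by simp [pvSplitU, h],
        pvRender_split cs [c]]
      simp

-- A's loop returns early when the total count is odd and an underscore occurs
lemma pvALoop_odd (tot : Int) (htot : PySem.Int.mod tot 2 ≠ 0) (cs : List Char)
    (hmem : '_' ∈ cs) :
    ∀ (acc : List Char) (icount : Int), pvALoop tot cs acc false icount = none := by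
  induction cs with
  | nil => cases hmem
  | cons c cs ih =>
    intro acc icount
    by_cases h : c = '_'
    · subst h
      have htot' : ¬ (2 ∣ tot) := fun hd => htot ((PySem.Int.mod_eq_zero_iff_dvd tot 2).mpr hd)
      simp [pvALoop, htot, htot']
    · have hb : (c == '_') = false := by simp [h]
      have hmem' : '_' ∈ cs := by
        cases hmem with
        | head => exact absurd rfl h
        | tail _ hm => exact hm
      simp only [pvALoop, hb, if_false, ne_eq, h, not_false_iff, true_and, if_true,
        Bool.false_eq_true, false_and]
      exact ih hmem' _ _

-- B's wrap rendering over enumerate equals pvWrap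
lemma pvJoin_flatten (ps : List (List Char)) : PySem.Chars.join [] ps = ps.flatten := by
  induction ps with
  | nil => simp [PySem.Chars.join_nil]
  | cons p ps ih =>
    cases ps with
    | nil => simp [PySem.Chars.join_singleton]
    | cons q rest => rw [PySem.Chars.join_cons_cons, ih]; simp

lemma pvEnum_wrap (ps : List (List Char)) (s : Int) (hs : 0 ≤ s) :
    ((PySem.List.enumerate ps s).map (fun pi =>
      if PySem.Int.mod pi.1 2 = 1
      then ('<' :: 'i' :: '>' :: []) ++ pi.2 ++ ('<' :: '/' :: 'i' :: '>' :: [])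
      else pi.2)).flatten = pvWrap ps (s % 2 == 1) := by
  induction ps generalizing s with
  | nil => simp [PySem.List.enumerate_nil, pvWrap]
  | cons p ps ih =>
    rw [PySem.List.enumerate_cons]
    have hm : PySem.Int.mod s 2 = s % 2 := PySem.Int.mod_eq_emod_of_pos (by norm_num)
    rw [List.map_cons, List.flatten_cons, ih (s + 1) (by omega), hm]
    rcases Int.emod_two_eq_zero_or_one s with h2 | h2
    · have h3 : (s + 1) % 2 = 1 := by omega
      simp [pvWrap, h2, h3]
    · have h3 : (s + 1) % 2 = 0 := by omega
      simp [pvWrap, h2, h3]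

-- pvWrap with an odd number of parts equals pvRender
lemma pvWrap_eq_pvRender (ps : List (List Char)) :
    (ps.length % 2 = 1 → pvWrap ps false = pvRender ps true) ∧
    (ps.length % 2 = 0 → ps ≠ [] →
      pvWrap ps true = ('<' :: 'i' :: '>' :: []) ++ pvRender ps false) := by
  induction ps with
  | nil => constructor <;> intro h <;> simp_all
  | cons p ps ih =>
    constructor
    · intro h
      cases ps with
      | nil => simp [pvWrap, pvRender]
      | cons q rest =>
        have : (q :: rest).length % 2 = 0 := by simp at h ⊢; omega
        rw [show pvWrap (p :: q :: rest) false = p ++ pvWrap (q :: rest) true from by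
              simp [pvWrap],
          ih.2 this (by simp)]
        simp [pvRender]
    · intro h hne
      have hlen : ps.length % 2 = 1 := by simp at h; omega
      have hps : ps ≠ [] := by intro h'; rw [h'] at hlen; simp at hlen
      obtain ⟨q, rest, hrest⟩ := List.exists_cons_of_ne_nil hps
      subst hrest
      rw [show pvWrap (p :: q :: rest) true =
            (('<' :: 'i' :: '>' :: []) ++ p ++ ('<' :: '/' :: 'i' :: '>' :: [])) ++
              pvWrap (q :: rest) false from by simp [pvWrap],
        ih.1 hlen]
      simp [pvRender]

-- the loop's total equals the underscore count
lemma pvTot_eq (cs : List Char) :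
    cs.foldl (fun n c => if c == '_' then n + 1 else n) (0 : Int) = (cs.countP (· == '_') : Int) := by
  have := PySem.List.foldl_count_if (fun c => c == '_') cs 0
  simpa using this

-- ===== VERDICT (by name: the statement is the Claim_ definition above) =====
theorem compile_italic_underscore_spec : Claim_equal_compile_italic_underscore := by
  intro line _
  unfold Spec_compile_italic_underscore compile_italic_underscore compile_italic_underscore_alt
  simp only [pvSplitOn_eq, pvTot_eq]
  set cs := line.toList with hcs
  set k := cs.countP (· == '_') with hk
  by_cases hpar : k % 2 = 0
  · have htot : PySem.Int.mod (k : Int) 2 = 0 := by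
      rw [PySem.Int.mod_eq_emod_of_pos (by norm_num)]
      omega
    rw [pvALoop_even (k : Int) htot cs [] 1 (by norm_num)]
    have hlen : (pvSplitU cs []).length % 2 = 1 := by
      rw [pvSplitU_length]; omega
    have hguard : ¬ (pvSplitU cs []).length % 2 = 0 := by omega
    simp only [if_neg hguard]
    rw [pvJoin_flatten, pvEnum_wrap _ 0 (by norm_num)]
    have := (pvWrap_eq_pvRender (pvSplitU cs [])).1 hlen
    simp only [show ((0 : Int) % 2 == 1) = false from rfl] at *
    rw [this]
    simp [show PySem.Int.mod 1 2 = 1 from rfl]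
  · have htot : PySem.Int.mod (k : Int) 2 ≠ 0 := by
      rw [PySem.Int.mod_eq_emod_of_pos (by norm_num)]
      omega
    have hmem : '_' ∈ cs := by
      have : 0 < k := by omega
      rw [hk] at this
      rw [List.countP_pos_iff] at this
      obtain ⟨c, hc, hcp⟩ := this
      simpa [show c = '_' from by simpa using hcp] using hc
    rw [pvALoop_odd (k : Int) htot cs hmem]
    have hguard : (pvSplitU cs []).length % 2 = 0 := by
      rw [pvSplitU_length]; omega
    simp [hguard]
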